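-- pv_equiv track=rewrite | github.com/ArcN00b/P2PEsercitazione4 | Utility.py | partChecker
-- ===== SOURCE A (Python) =====
-- def partChecker(listParts, length):
--     for j in range(0, length):
--
--         # Controllo che sia presente almeno un 1 in posizione "j" tra tutte le righe della lista
--         match = False
--         for i in range(0, len(listParts)):
--             if listParts[i][j] == '1':
--                 match = True
--                 break
--
--         # Se non ho trovato un 1 in quella posizione allora ritorno False
--         if not match:
--             return False
--
--     # Ritorno true se complessivamente tutte le parti del file sono disponibili in rete
--     return True
-- ===== SOURCE B (Python) =====
-- def partChecker(listParts, length):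
--     covered = set()
--     for row in listParts:
--         for j, c in enumerate(row):
--             if c == '1':
--                 covered.add(j)
--     return all(j in covered for j in range(length))
-- ===== Notes on version B (the rewrite author's own statement) =====
-- stated objective: simpler
-- what changed: A's column-major nested scan with an early break per column is replaced by one row-major pass that records the set of column positions holding a '1', followed by a membership test over range(length).
import Mathlib
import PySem

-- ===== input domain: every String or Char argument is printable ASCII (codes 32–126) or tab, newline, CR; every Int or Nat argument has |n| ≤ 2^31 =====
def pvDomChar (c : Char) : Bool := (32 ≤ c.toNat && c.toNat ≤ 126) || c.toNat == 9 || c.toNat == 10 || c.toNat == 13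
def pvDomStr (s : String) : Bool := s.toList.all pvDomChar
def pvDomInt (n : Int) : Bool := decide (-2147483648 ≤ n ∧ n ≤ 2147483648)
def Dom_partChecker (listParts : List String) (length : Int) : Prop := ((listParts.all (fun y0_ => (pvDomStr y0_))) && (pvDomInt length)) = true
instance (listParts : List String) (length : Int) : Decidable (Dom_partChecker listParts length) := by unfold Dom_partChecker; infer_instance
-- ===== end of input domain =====

-- B replaces A's column-major nested scan (early break per column) by one row-major pass
-- collecting the set of '1'-positions, then a membership test over range(length); objective: simpler.

-- ===== PORT A =====
-- inner loop: 'for i in range(0, len(listParts)): if listParts[i][j] == '1': match = True; break'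
-- (none = the IndexError Python raises on a too-short row)
def pvInnerA (rows : List String) (j : Int) : Option Bool :=
  match rows with
  | [] => some false
  | r :: rest =>
    match PySem.Str.pyGet? r j with
    | none => none
    | some c => if c = '1' then some true else pvInnerA rest j

-- outer loop 'for j in range(0, length): … if not match: return False' / final 'return True',
-- as Python runs it: j counts up lazily and the loop exits at the first failing column
def pvOuterA (rows : List String) (j : Int) (length : Int) : Option Bool :=
  if _h : j < length then
    match pvInnerA rows j with
    | none => none
    | some b => if b then pvOuterA rows (j + 1) length else some false
  else some true
termination_by (length - j).toNat
decreasing_by omega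

def partChecker (listParts : List String) (length : Int) : Bool :=
  (pvOuterA listParts 0 length).getD false

-- ===== PORT B =====
-- 'covered = set(); for row in listParts: for j, c in enumerate(row): if c == '1': covered.add(j)'
def pvCoveredB (rows : List String) : PySem.Set Int :=
  rows.foldl
    (fun s r => (PySem.List.enumerate r.toList 0).foldl
      (fun s p => if p.2 = '1' then PySem.Set.add s p.1 else s) s)
    PySem.Set.empty

-- 'all(j in covered for j in range(length))' — a lazy generator: stops at the first j not covered
def pvAllCoveredB (covered : PySem.Set Int) (j : Int) (length : Int) : Bool :=
  if h : j < length then covered.contains j && pvAllCoveredB covered (j + 1) length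
  else true
termination_by (length - j).toNat
decreasing_by omega

def partChecker_alt (listParts : List String) (length : Int) : Bool :=
  pvAllCoveredB (pvCoveredB listParts) 0 length

-- ===== PRECONDITION & SPEC =====
-- column j has a '1' in some row
def pvColHasOne (rows : List String) (j : Nat) : Bool :=
  rows.any (fun r => r.toList[j]? == some '1')

-- A's scan of column j completes without IndexError: every row it reaches
-- (i.e. every row not preceded by a row with a '1' at j) is longer than j
def pvColScanSafe (rows : List String) (j : Nat) : Prop :=
  ∀ i < rows.length,
    j < (rows[i]?.getD "").toList.length ∨
    (rows.take i).any (fun r => r.toList[j]? == some '1') = true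

def pvMaxLen (rows : List String) : Nat :=
  rows.foldr (fun r m => max r.toList.length m) 0

-- Pre_ = exactly the inputs where A returns: every column A actually reaches (all earlier
-- columns matched) scans without IndexError.  A never reaches a column past the longest row
-- plus one (that column cannot match), so quantifying up to min(length, maxLen+1) is exact.
def Pre_partChecker (listParts : List String) (length : Int) : Prop :=
  ∀ j < min length.toNat (pvMaxLen listParts + 1),
    (∀ j' < j, pvColHasOne listParts j' = true) → pvColScanSafe listParts j

instance (listParts : List String) (length : Int) : Decidable (Pre_partChecker listParts length) := by
  unfold Pre_partChecker pvColScanSafe; infer_instance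

def pvWitness_partChecker : List String × Int := (["10", "01"], 2)

def Spec_partChecker (listParts : List String) (length : Int) (out : Bool) : Prop := out = partChecker_alt listParts length
instance (listParts : List String) (length : Int) (out : Bool) : Decidable (Spec_partChecker listParts length out) := by unfold Spec_partChecker; infer_instance

-- ===== CLAIM (what is proved, stated in full; the proofs are below) =====
def Claim_equal_partChecker : Prop := ∀ (listParts : List String) (length : Int), Dom_partChecker listParts length → Pre_partChecker listParts length → Spec_partChecker listParts length (partChecker listParts length)

-- ===== LEMMAS AND PROOFS =====

-- A's inner loop, when it cannot raise, computes 'some column-has-a-1'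
theorem pvInnerA_eq (rows : List String) (j : Nat) (hs : pvColScanSafe rows j) :
    pvInnerA rows (j : Int) = some (pvColHasOne rows j) := by
  induction rows with
  | nil => simp [pvInnerA, pvColHasOne]
  | cons r rest ih =>
    have h0 := hs 0 (by simp)
    simp at h0
    have hjr : j < r.toList.length := h0
    have hget : PySem.Str.pyGet? r (j : Int) = some r.toList[j] := by
      rw [PySem.Str.pyGet?_natCast, List.getElem?_eq_getElem hjr]
    by_cases h1 : r.toList[j] = '1'
    · simp [pvInnerA, h1, pvColHasOne, List.getElem?_eq_getElem hjr]
    · have hrest : pvColScanSafe rest j := by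
        intro i hi
        have := hs (i + 1) (by simpa using Nat.succ_lt_succ hi)
        simpa [List.getElem?_eq_getElem hjr, h1] using this
      simp only [pvInnerA, hget, if_neg h1]
      rw [ih hrest]
      simp [pvColHasOne, List.getElem?_eq_getElem hjr, h1]

theorem rowLen_le_pvMaxLen (rows : List String) (r : String) (hr : r ∈ rows) :
    r.toList.length ≤ pvMaxLen rows := by
  induction rows with
  | nil => cases hr
  | cons x xs ih =>
    rcases List.mem_cons.mp hr with h | h
    · simp [pvMaxLen, h]
    · have := ih h
      simp only [pvMaxLen, List.foldr_cons] at *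
      omega

-- no row has a character at column maxLen (or beyond)
theorem pvColHasOne_maxLen (rows : List String) : pvColHasOne rows (pvMaxLen rows) = false := by
  simp only [pvColHasOne, List.any_eq_false]
  intro r hr
  rw [List.getElem?_eq_none (rowLen_le_pvMaxLen rows r hr)]
  simp

-- A's outer loop, when each reached column scans safely, computes 'all columns have a 1'
theorem pvOuterA_eq (rows : List String) (len : Int) :
    ∀ (fuel a : Nat), len.toNat - a ≤ fuel →
    (∀ j : Nat, j < len.toNat → a ≤ j →
      (∀ j' : Nat, a ≤ j' → j' < j → pvColHasOne rows j' = true) → pvColScanSafe rows j) →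
    pvOuterA rows (a : Int) len =
      some (decide (∀ j : Nat, j < len.toNat → a ≤ j → pvColHasOne rows j = true)) := by
  intro fuel
  induction fuel with
  | zero =>
    intro a hfuel _
    rw [pvOuterA, dif_neg (by omega)]
    congr 1
    symm
    rw [decide_eq_true_iff]
    intro j hj haj
    omega
  | succ f ih =>
    intro a hfuel hsafe
    by_cases hlt : (a : Int) < len
    · have han : a < len.toNat := by omega
      have hs : pvColScanSafe rows a :=
        hsafe a han (le_refl a) (by intro j' h1 h2; omega)
      rw [pvOuterA, dif_pos hlt, pvInnerA_eq rows a hs]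
      cases hm : pvColHasOne rows a with
      | false =>
        simp only [Bool.false_eq_true, if_false]
        congr 1
        symm
        rw [decide_eq_false_iff_not]
        intro hall
        rw [hall a han (le_refl a)] at hm
        cases hm
      | true =>
        simp only [if_true]
        have : ((a : Int) + 1) = ((a + 1 : Nat) : Int) := by push_cast; ring
        rw [this, ih (a + 1) (by omega) ?hyp]
        case hyp =>
          intro j hj haj hmatched
          refine hsafe j hj (by omega) ?_
          intro j' h1 h2
          rcases Nat.eq_or_lt_of_le h1 with h | h
          · exact h ▸ hm
          · exact hmatched j' h h2
        congr 1
        rw [decide_eq_decide]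
        constructor
        · intro hall j hj haj
          rcases Nat.eq_or_lt_of_le haj with h | h
          · exact h ▸ hm
          · exact hall j hj h
        · intro hall j hj haj
          exact hall j hj (by omega)
    · rw [pvOuterA, dif_neg hlt]
      congr 1
      symm
      rw [decide_eq_true_iff]
      intro j hj haj
      omega

-- B's generator 'all(j in covered for j in range(length))', from position a on
theorem pvAllCoveredB_eq (cov : PySem.Set Int) (len : Int) :
    ∀ (fuel a : Nat), len.toNat - a ≤ fuel →
    pvAllCoveredB cov (a : Int) len =
      decide (∀ j : Nat, j < len.toNat → a ≤ j → cov.contains (j : Int) = true) := by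
  intro fuel
  induction fuel with
  | zero =>
    intro a hfuel
    rw [pvAllCoveredB, dif_neg (by omega)]
    symm
    rw [decide_eq_true_iff]
    intro j hj haj
    omega
  | succ f ih =>
    intro a hfuel
    by_cases hlt : (a : Int) < len
    · have han : a < len.toNat := by omega
      rw [pvAllCoveredB, dif_pos hlt]
      have : ((a : Int) + 1) = ((a + 1 : Nat) : Int) := by push_cast; ring
      rw [this, ih (a + 1) (by omega)]
      cases hc : cov.contains (a : Int) with
      | false =>
        simp only [Bool.false_and]
        symm
        rw [decide_eq_false_iff_not]
        intro hall
        rw [hall a han (le_refl a)] at hc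
        cases hc
      | true =>
        simp only [Bool.true_and]
        rw [decide_eq_decide]
        constructor
        · intro hall j hj haj
          rcases Nat.eq_or_lt_of_le haj with h | h
          · exact h ▸ hc
          · exact hall j hj h
        · intro hall j hj haj
          exact hall j hj (by omega)
    · rw [pvAllCoveredB, dif_neg hlt]
      symm
      rw [decide_eq_true_iff]
      intro j hj haj
      omega

-- B's inner fold: membership in the accumulated set
theorem pvCoveredB_inner (row : List Char) : ∀ (s : PySem.Set Int) (a : Int) (x : Int),
    (x ∈ (PySem.List.enumerate row a).foldl
      (fun s p => if p.2 = '1' then PySem.Set.add s p.1 else s) s) ↔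
    x ∈ s ∨ ∃ k : Nat, row[k]? = some '1' ∧ x = a + k := by
  induction row with
  | nil => simp [PySem.List.enumerate]
  | cons c cs ih =>
    intro s a x
    rw [PySem.List.enumerate_cons]
    simp only [List.foldl_cons]
    by_cases h1 : c = '1'
    · rw [if_pos h1, ih]
      constructor
      · rintro (hs | ⟨k, hk, hx⟩)
        · rcases (PySem.Set.mem_add s a x).mp hs with hs | hs
          · exact Or.inl hs
          · exact Or.inr ⟨0, by simp [h1], by simp [hs]⟩
        · exact Or.inr ⟨k + 1, by simpa using hk, by push_cast; omega⟩
      · rintro (hs | ⟨k, hk, hx⟩)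
        · exact Or.inl ((PySem.Set.mem_add s a x).mpr (Or.inl hs))
        · cases k with
          | zero => exact Or.inl ((PySem.Set.mem_add s a x).mpr (Or.inr (by simpa using hx)))
          | succ k => exact Or.inr ⟨k, by simpa using hk, by push_cast at hx ⊢; omega⟩
    · rw [if_neg h1, ih]
      constructor
      · rintro (hs | ⟨k, hk, hx⟩)
        · exact Or.inl hs
        · exact Or.inr ⟨k + 1, by simpa using hk, by push_cast; omega⟩
      · rintro (hs | ⟨k, hk, hx⟩)
        · exact Or.inl hs
        · cases k with
          | zero => simp at hk; exact absurd hk h1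
          | succ k => exact Or.inr ⟨k, by simpa using hk, by push_cast at hx ⊢; omega⟩

-- B's covered set holds exactly the '1'-positions of the rows
theorem mem_pvCoveredB (rows : List String) (x : Int) :
    x ∈ pvCoveredB rows ↔ ∃ r ∈ rows, ∃ k : Nat, r.toList[k]? = some '1' ∧ x = k := by
  unfold pvCoveredB
  suffices h : ∀ (s : PySem.Set Int),
      (x ∈ rows.foldl (fun s r => (PySem.List.enumerate r.toList 0).foldl
        (fun s p => if p.2 = '1' then PySem.Set.add s p.1 else s) s) s) ↔
      x ∈ s ∨ ∃ r ∈ rows, ∃ k : Nat, r.toList[k]? = some '1' ∧ x = k by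
    simpa [PySem.Set.empty] using h PySem.Set.empty
  induction rows with
  | nil => simp
  | cons r rest ih =>
    intro s
    simp only [List.foldl_cons]
    rw [ih, pvCoveredB_inner]
    constructor
    · rintro ((hs | ⟨k, hk, hx⟩) | h)
      · exact Or.inl hs
      · exact Or.inr ⟨r, by simp, k, hk, by omega⟩
      · rcases h with ⟨r', hr', hrest⟩; exact Or.inr ⟨r', by simp [hr'], hrest⟩
    · rintro (hs | ⟨r', hr', k, hk, hx⟩)
      · exact Or.inl (Or.inl hs)
      · rcases List.mem_cons.mp hr' with h | h
        · exact Or.inl (Or.inr ⟨k, h ▸ hk, by omega⟩)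
        · exact Or.inr ⟨r', h, k, hk, hx⟩

theorem contains_pvCoveredB (rows : List String) (j : Nat) :
    PySem.Set.contains (pvCoveredB rows) (j : Int) = pvColHasOne rows j := by
  rw [Bool.eq_iff_iff, PySem.Set.contains_iff, mem_pvCoveredB]
  simp only [pvColHasOne, List.any_eq_true, beq_iff_eq]
  constructor
  · rintro ⟨r, hr, k, hk, hx⟩
    have : j = k := by exact_mod_cast hx
    exact ⟨r, hr, this ▸ hk⟩
  · rintro ⟨r, hr, hk⟩
    exact ⟨r, hr, j, hk, rfl⟩

-- ===== VERDICT (by name: the statement is the Claim_ definition above) =====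
theorem partChecker_spec : Claim_equal_partChecker := by
  intro listParts length _hdom hpre
  unfold Spec_partChecker partChecker partChecker_alt
  have hsafe : ∀ j : Nat, j < length.toNat → 0 ≤ j →
      (∀ j' : Nat, 0 ≤ j' → j' < j → pvColHasOne listParts j' = true) →
      pvColScanSafe listParts j := by
    intro j hj _ hmatched
    by_cases hM : j < pvMaxLen listParts + 1
    · exact hpre j (by omega) (fun j' hj' => hmatched j' (Nat.zero_le _) hj')
    · exfalso
      have := hmatched (pvMaxLen listParts) (Nat.zero_le _) (by omega)
      rw [pvColHasOne_maxLen] at this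
      cases this
  have hA := pvOuterA_eq listParts length length.toNat 0 (by omega) hsafe
  have hB := pvAllCoveredB_eq (pvCoveredB listParts) length length.toNat 0 (by omega)
  rw [show ((0 : Nat) : Int) = (0 : Int) by norm_num] at hA hB
  rw [hA, hB, Option.getD_some, decide_eq_decide]
  constructor
  · intro h j hj haj
    rw [contains_pvCoveredB]
    exact h j hj haj
  · intro h j hj haj
    have := h j hj haj
    rwa [contains_pvCoveredB] at this
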